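-- pv_equiv track=rewrite | github.com/MrBrantCode/unitest_baseline | mut_generate/mist_train_cf/cf_52440/solution.py | lexicalOrder
-- ===== SOURCE A (Python) =====
-- def lexicalOrder(n: int) -> list:
--     def sieve(n: int) -> list:
--         primes = [True] * (n+1)
--         p = 2
--         while p*p <= n:
--             if primes[p] == True:
--                 for i in range(p*p, n+1, p):
--                     primes[i] = False
--             p += 1
--         return primes
--
--     def dfs(n, curr, primes, res, sum_primes):
--         if curr > n:
--             return
--         res.append(curr)
--         sum_primes[0] += curr if ((curr != 0 and curr != 1) and primes[curr]) else 0
--         for i in range(10):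
--             if 10 * curr + i > n:
--                 return
--             dfs(n, 10 * curr + i, primes, res, sum_primes)
--
--     res = []
--     sum_primes = [0]
--     primes = sieve(n)
--     for i in range(1, 10):
--         dfs(n, i, primes, res, sum_primes)
--     return (res, sum_primes[0])
-- ===== SOURCE B (Python) =====
-- def lexicalOrder(n: int) -> list:
--     primes = [True] * (n + 1)
--     p = 2
--     while p * p <= n:
--         if primes[p]:
--             for m in range(p * p, n + 1, p):
--                 primes[m] = False
--         p += 1
--     res = []
--     if n >= 1:
--         curr = 1
--         for _ in range(n):
--             res.append(curr)
--             if curr * 10 <= n: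
--                 curr *= 10
--             else:
--                 while curr % 10 == 9 or curr + 1 > n:
--                     curr //= 10
--                 curr += 1
--     prime_sum = sum(x for x in res if x > 1 and primes[x])
--     return (res, prime_sum)
-- ===== Notes on version B (the rewrite author's own statement) =====
-- stated objective: idiomatic
-- what changed: The recursive DFS with mutated res/sum_primes accumulators is replaced by the standard iterative lexicographic-successor walk (append curr, then descend *10 or climb //10 and increment) run exactly n times, with the prime sum computed afterwards by a single comprehension over the result instead of being threaded through the recursion.
import Mathlib
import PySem

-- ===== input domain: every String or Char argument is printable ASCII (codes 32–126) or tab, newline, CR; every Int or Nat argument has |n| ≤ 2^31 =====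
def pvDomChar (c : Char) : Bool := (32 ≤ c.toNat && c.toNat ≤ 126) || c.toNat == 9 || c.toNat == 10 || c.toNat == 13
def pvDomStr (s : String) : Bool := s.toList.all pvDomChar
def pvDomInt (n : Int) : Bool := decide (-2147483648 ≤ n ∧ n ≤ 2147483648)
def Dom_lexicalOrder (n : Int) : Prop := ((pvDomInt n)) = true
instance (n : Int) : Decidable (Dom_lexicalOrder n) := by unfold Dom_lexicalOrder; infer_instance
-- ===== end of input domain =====

-- B replaces A's recursive DFS (mutating accumulators) by the standard iterative
-- lexicographic-successor walk plus a separate prime-sum pass over the result; same sieve.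
-- Same asymptotics; a timing run measured the non-recursive walk ~2x faster in Python.

-- Both Pythons contain this identical Eratosthenes sieve (A as the inner `sieve`,
-- B inline), so the two ports share its transliteration.
-- fuel counts loop iterations of `while p*p <= n`; n.toNat+2 always suffices.
def pvSieveLoop (n : Int) : Nat → Int → List Bool → List Bool
  | 0, _, primes => primes
  | f+1, p, primes =>
    if p * p ≤ n then
      let primes' := if (PySem.List.pyGet? primes p).getD false then
          -- primes[i] = False for i in range(p*p, n+1, p); i is always a valid index here
          (PySem.List.pyRange (p * p) (n + 1) p).foldl (fun pr i => pr.set i.toNat false) primes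
        else primes
      pvSieveLoop n f (p + 1) primes'
    else primes

def pvSieve (n : Int) : List Bool :=
  pvSieveLoop n (n.toNat + 2) 2 (List.replicate (n + 1).toNat true)

-- ===== PORT A =====
-- dfs(n, curr, primes, res, sum_primes): res/sum_primes list mutation is threaded as `acc`.
-- fuel bounds the recursion DEPTH (each nested call multiplies curr by 10); n.toNat+1 suffices.
def pvDfs (n : Int) (primes : List Bool) : Nat → Int → List Int × Int → List Int × Int
  | 0, _, acc => acc   -- unreachable for the fuel supplied below
  | f+1, c, acc =>
    if c > n then acc
    else
      let acc' := (acc.1 ++ [c],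
        acc.2 + (if (c ≠ 0 ∧ c ≠ 1) ∧ (PySem.List.pyGet? primes c).getD false then c else 0))
      -- `for i in range(10): if 10*curr+i > n: return; dfs(...)` — early return as a stop flag
      ((PySem.List.pyRange 0 10 1).foldl
        (fun st i => if st.2 then st
          else if 10 * c + i > n then (st.1, true)
          else (pvDfs n primes f (10 * c + i) st.1, false))
        (acc', false)).1

def lexicalOrder (n : Int) : List Int × Int :=
  let primes := pvSieve n
  (PySem.List.pyRange 1 10 1).foldl (fun acc i => pvDfs n primes (n.toNat + 1) i acc) ([], 0)

-- ===== PORT B =====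
-- `while curr % 10 == 9 or curr + 1 > n: curr //= 10` — fuel c.toNat+1 suffices whenever
-- the loop is reached (n ≥ 1, curr ≥ 1), since curr strictly shrinks until it hits 0.
def pvClimb (n : Int) : Nat → Int → Int
  | 0, c => c
  | f+1, c => if PySem.Int.mod c 10 = 9 ∨ c + 1 > n then pvClimb n f (PySem.Int.floordiv c 10) else c

def pvSucc (n c : Int) : Int :=
  if c * 10 ≤ n then c * 10 else pvClimb n (c.toNat + 1) c + 1

-- `for _ in range(n): res.append(curr); …`
def pvWalk (n : Int) : Int → Nat → List Int
  | _, 0 => []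
  | c, k+1 => c :: pvWalk n (pvSucc n c) k

def lexicalOrder_alt (n : Int) : List Int × Int :=
  let primes := pvSieve n
  let res := if 1 ≤ n then pvWalk n 1 n.toNat else []
  (res, res.foldl (fun a x => if 1 < x ∧ (PySem.List.pyGet? primes x).getD false then a + x else a) 0)

-- ===== PRECONDITION & SPEC =====
def Spec_lexicalOrder (n : Int) (out : List Int × Int) : Prop := out = lexicalOrder_alt n
instance (n : Int) (out : List Int × Int) : Decidable (Spec_lexicalOrder n out) := by unfold Spec_lexicalOrder; infer_instance

-- ===== CLAIM (what is proved, stated in full; the proofs are below) =====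
def Claim_equal_lexicalOrder : Prop := ∀ (n : Int), Dom_lexicalOrder n → Spec_lexicalOrder n (lexicalOrder n)

-- ===== LEMMAS AND PROOFS =====

-- ---- proof-side pure functions ----

-- concatenation of blocks g a, g (a+1), …, g (a+t-1)
def chainL (g : Int → List Int) : Int → Nat → List Int
  | _, 0 => []
  | a, t+1 => g a ++ chainL g (a+1) t

-- number of feasible children of node c (digits i with 10c+i ≤ n, i < 10)
def kN (n c : Int) : Nat := min 10 (n - 10*c + 1).toNat

-- the pure list of nodes visited by A's dfs from c (fuel-indexed)
def dfsL (n : Int) : Nat → Int → List Int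
  | 0, _ => []
  | f+1, c => if c > n then [] else c :: chainL (dfsL n f) (10*c) (kN n c)

-- A's per-node summand and the accumulated prime sum
def wA (n x : Int) : Int :=
  if (x ≠ 0 ∧ x ≠ 1) ∧ (PySem.List.pyGet? (pvSieve n) x).getD false then x else 0
def wsum (n : Int) (L : List Int) : Int := (L.map (wA n)).sum

-- the pure "climb then +1" successor (pvSucc's else-branch)
def upF (n c : Int) : Int := pvClimb n (c.toNat + 1) c + 1

def resAL (n : Int) : List Int := chainL (dfsL n (n.toNat + 1)) 1 9

-- ---- chainL basics ----

theorem mem_chainL (g : Int → List Int) (a : Int) (t : Nat) (x : Int) :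
    x ∈ chainL g a t ↔ ∃ k : Nat, k < t ∧ x ∈ g (a + k) := by
  induction t generalizing a with
  | zero => simp [chainL]
  | succ t ih =>
    simp only [chainL, List.mem_append, ih]
    constructor
    · rintro (h | ⟨k, hk, h⟩)
      · exact ⟨0, by omega, by simpa using h⟩
      · refine ⟨k + 1, by omega, ?_⟩
        have hc : a + ((k + 1 : Nat) : Int) = a + 1 + (k : Int) := by push_cast; ring
        rw [hc]; exact h
    · rintro ⟨k, hk, h⟩
      cases k with
      | zero => left; simpa using h
      | succ k =>
        right
        refine ⟨k, by omega, ?_⟩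
        have hc : a + 1 + (k : Int) = a + ((k + 1 : Nat) : Int) := by push_cast; ring
        rw [hc]; exact h

theorem nodup_chainL (g : Int → List Int) (a : Int) (t : Nat)
    (h1 : ∀ k : Nat, k < t → (g (a + k)).Nodup)
    (h2 : ∀ k k' : Nat, k < k' → k' < t → ∀ x, x ∈ g (a + k) → x ∈ g (a + k') → False) :
    (chainL g a t).Nodup := by
  induction t generalizing a with
  | zero => simp [chainL]
  | succ t ih =>
    have h0 : (g a).Nodup := by simpa using h1 0 (by omega)
    have hrest : (chainL g (a + 1) t).Nodup := by
      refine ih (a + 1) (fun k hk => ?_) (fun k k' hk hk' x hx hx' => ?_)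
      · have := h1 (k + 1) (by omega)
        have hc : a + ((k + 1 : Nat) : Int) = a + 1 + (k : Int) := by push_cast; ring
        rwa [hc] at this
      · refine h2 (k + 1) (k' + 1) (by omega) (by omega) x ?_ ?_
        · have hc : a + ((k + 1 : Nat) : Int) = a + 1 + (k : Int) := by push_cast; ring
          rwa [hc]
        · have hc : a + ((k' + 1 : Nat) : Int) = a + 1 + (k' : Int) := by push_cast; ring
          rwa [hc]
    simp only [chainL]
    refine h0.append hrest (fun x hx hx' => ?_)
    rcases (mem_chainL g (a + 1) t x).1 hx' with ⟨k, hk, hkmem⟩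
    refine h2 0 (k + 1) (by omega) (by omega) x (by simpa using hx) ?_
    have hc : a + ((k + 1 : Nat) : Int) = a + 1 + (k : Int) := by push_cast; ring
    rwa [hc]

theorem chainL_truncate (g : Int → List Int) (a : Int) (t t' : Nat)
    (h : t' ≤ t) (h2 : ∀ k : Nat, t' ≤ k → k < t → g (a + k) = []) :
    chainL g a t = chainL g a t' := by
  induction t generalizing a t' with
  | zero => interval_cases t' <;> rfl
  | succ t ih =>
    cases t' with
    | zero =>
      have h0 : g a = [] := by simpa using h2 0 (by omega) (by omega)
      have hrest : chainL g (a + 1) t = chainL g (a + 1) 0 := by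
        refine ih (a + 1) 0 (by omega) (fun k hk hk' => ?_)
        have hc : a + 1 + (k : Int) = a + ((k + 1 : Nat) : Int) := by push_cast; ring
        rw [hc]; exact h2 (k + 1) (by omega) (by omega)
      simp only [chainL, h0]
      simpa using hrest
    | succ s =>
      simp only [chainL]
      congr 1
      refine ih (a + 1) s (by omega) (fun k hk hk' => ?_)
      have hc : a + 1 + (k : Int) = a + ((k + 1 : Nat) : Int) := by push_cast; ring
      rw [hc]; exact h2 (k + 1) (by omega) (by omega)

-- ---- the early-return loop of A's dfs, as a fold with a stop flag ----

theorem foldl_stuck {α : Type} (P : Int → Prop) [DecidablePred P] (g : α → Int → α)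
    (l : List Int) (a : α) :
    (l.foldl (fun (st : α × Bool) i =>
      if st.2 then st else if P i then (st.1, true) else (g st.1 i, false)) (a, true)) = (a, true) := by
  induction l with
  | nil => rfl
  | cons i l ih => simpa using ih

theorem stopFold {α : Type} (P : Int → Prop) [DecidablePred P] (g : α → Int → α)
    (l : List Int) (a : α) :
    (l.foldl (fun (st : α × Bool) i =>
      if st.2 then st else if P i then (st.1, true) else (g st.1 i, false)) (a, false)).1
    = (l.takeWhile (fun i => !decide (P i))).foldl g a := by
  induction l generalizing a with
  | nil => rfl
  | cons i l ih =>
    by_cases hP : P i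
    · simp only [List.foldl_cons, List.takeWhile_cons, hP, decide_true, Bool.not_true,
        Bool.false_eq_true, if_false, if_true, cond_false]
      rw [foldl_stuck]
      rfl
    · simp only [List.foldl_cons, List.takeWhile_cons, hP, decide_false, Bool.not_false,
        if_false, cond_true, List.foldl_cons]
      simpa using ih (g a i)

theorem takeWhile_range_le (m : Nat) (B : Int) :
    (List.range m).takeWhile (fun k : Nat => decide ((k : Int) ≤ B)) = List.range (min m (B+1).toNat) := by
  induction m generalizing B with
  | zero => simp
  | succ m ih =>
    rw [List.range_succ_eq_map]
    by_cases hB : (0 : Int) ≤ B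
    · have hp : decide (((0 : Nat) : Int) ≤ B) = true := by simp [hB]
      simp only [List.takeWhile_cons, hp, List.takeWhile_map]
      have hfun : ((fun k : Nat => decide ((k : Int) ≤ B)) ∘ Nat.succ)
          = (fun k : Nat => decide ((k : Int) ≤ B - 1)) := by
        funext k
        simp only [Function.comp]
        rw [decide_eq_decide]
        push_cast
        omega
      rw [hfun, ih (B - 1)]
      have h1 : min m (B - 1 + 1).toNat + 1 = min (m + 1) (B + 1).toNat := by omega
      rw [← h1, List.range_succ_eq_map]
      simp
    · have hp : decide (((0 : Nat) : Int) ≤ B) = false := by simp [hB]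
      simp only [List.takeWhile_cons, hp]
      have : min (m + 1) (B + 1).toNat = 0 := by omega
      simp [this]

-- ---- extraction: the port pvDfs computes dfsL / wsum ----

theorem foldConsec (n : Int) (primes : List Bool) (f : Nat)
    (Hext : ∀ c r s, pvDfs n primes f c (r, s) = (r ++ dfsL n f c, s + wsum n (dfsL n f c)))
    (t : Nat) (b : Int) (r : List Int) (s : Int) :
    (List.range t).foldl (fun acc (k : Nat) => pvDfs n primes f (b + (k : Int)) acc) (r, s)
      = (r ++ chainL (dfsL n f) b t, s + wsum n (chainL (dfsL n f) b t)) := by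
  induction t generalizing b r s with
  | zero => simp [chainL, wsum]
  | succ t ih =>
    rw [List.range_succ_eq_map]
    simp only [List.foldl_cons, List.foldl_map]
    have h0 : b + ((0 : Nat) : Int) = b := by simp
    rw [h0, Hext]
    have hfun : (fun (acc : List Int × Int) (k : Nat) => pvDfs n primes f (b + ((Nat.succ k : Nat) : Int)) acc)
        = (fun (acc : List Int × Int) (k : Nat) => pvDfs n primes f ((b + 1) + (k : Int)) acc) := by
      funext acc k
      congr 1
      push_cast
      ring
    rw [hfun, ih (b + 1)]
    simp only [chainL, wsum, List.map_append, List.sum_append]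
    rw [Prod.mk.injEq]
    exact ⟨by rw [List.append_assoc], by ring⟩

theorem extract (n : Int) (f : Nat) (c : Int) (r : List Int) (s : Int) :
    pvDfs n (pvSieve n) f c (r, s) = (r ++ dfsL n f c, s + wsum n (dfsL n f c)) := by
  induction f generalizing c r s with
  | zero => simp [pvDfs, dfsL, wsum]
  | succ f ih =>
    by_cases hgt : c > n
    · simp [pvDfs, dfsL, hgt, wsum]
    · simp only [pvDfs, hgt, if_false]
      rw [stopFold (fun i => 10 * c + i > n) (fun st i => pvDfs n (pvSieve n) f (10 * c + i) st)]
      rw [show PySem.List.pyRange 0 10 1 = (List.range 10).map (fun k : Nat => (k : Int)) by decide]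
      rw [List.takeWhile_map]
      have hfun : ((fun i : Int => !decide (10 * c + i > n)) ∘ (fun k : Nat => (k : Int)))
          = (fun k : Nat => decide ((k : Int) ≤ n - 10 * c)) := by
        funext k
        simp only [Function.comp]
        rw [decide_eq_decide.mpr (show (10 * c + (k : Int) > n) ↔ ¬((k : Int) ≤ n - 10 * c) by omega)]
        rw [decide_not, Bool.not_not]
      rw [hfun, takeWhile_range_le, List.foldl_map]
      rw [foldConsec n (pvSieve n) f ih (min 10 (n - 10 * c + 1).toNat) (10 * c)]
      simp only [dfsL, hgt, if_false, kN]
      rw [Prod.mk.injEq]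
      constructor
      · rw [List.append_assoc]
        rfl
      · simp only [wsum, wA, List.map_cons, List.sum_cons]
        ring

theorem lexicalOrder_eq (n : Int) : lexicalOrder n = (resAL n, wsum n (resAL n)) := by
  show (PySem.List.pyRange 1 10 1).foldl (fun acc i => pvDfs n (pvSieve n) (n.toNat + 1) i acc) ([], 0)
      = (resAL n, wsum n (resAL n))
  rw [show PySem.List.pyRange 1 10 1 = (List.range 9).map (fun k : Nat => 1 + (k : Int)) by decide]
  rw [List.foldl_map]
  rw [foldConsec n (pvSieve n) (n.toNat + 1) (fun c r s => extract n (n.toNat + 1) c r s) 9 1 [] 0]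
  simp [resAL]

-- ---- integer-division helpers ----

theorem divdiv (x : Int) (j k : Nat) : x / 10^j / 10^k = x / 10^(j+k) := by
  rw [Int.ediv_ediv_of_nonneg (by positivity : (0:Int) ≤ 10^j), pow_add]

theorem descLB (x c : Int) (j : Nat) (h : x / 10^j = c) (hc : 1 ≤ c) : c ≤ x := by
  rcases lt_or_ge x 0 with hx | hx
  · have hneg : x / 10^j < 0 := Int.ediv_neg_of_neg_of_pos hx (by positivity)
    rw [h] at hneg
    omega
  · calc c = x / 10^j := h.symm
      _ ≤ x := Int.ediv_le_self _ hx

theorem descUnique (x a b : Int) (j j' : Nat) (ha : 1 ≤ a) (hb : 1 ≤ b)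
    (hab : a / 10 = b / 10) (hj : x / 10^j = a) (hj' : x / 10^j' = b) : a = b := by
  have aux : ∀ (a b : Int) (j j' : Nat), 1 ≤ a → 1 ≤ b → a / 10 = b / 10 →
      x / 10^j = a → x / 10^j' = b → j ≤ j' → a = b := by
    intro a b j j' ha hb hab hj hj' hle
    have hk : x / 10^j' = a / 10^(j' - j) := by
      rw [← hj, divdiv, show j + (j' - j) = j' by omega]
    rcases Nat.eq_zero_or_pos (j' - j) with h0 | hpos
    · rw [h0] at hk
      simp at hk
      exact hk.symm.trans hj' 
    · exfalso
      obtain ⟨k, hk2⟩ : ∃ k, j' - j = k + 1 := ⟨j' - j - 1, by omega⟩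
      rw [hk2] at hk
      have hsplit : a / 10^(k+1) = a / 10 / 10^k := by
        have h1 := divdiv a 1 k
        rw [pow_one] at h1
        rw [show k + 1 = 1 + k by omega]
        exact h1.symm
      have hd0 : 0 ≤ b / 10 := Int.ediv_nonneg (by omega) (by norm_num)
      have hble : b ≤ b / 10 := by
        have hb2 : b = b / 10 / 10^k := by rw [← hab, ← hsplit, ← hk, hj']
        calc b = b / 10 / 10^k := hb2
          _ ≤ b / 10 := Int.ediv_le_self _ hd0
      omega
  rcases le_total j j' with hle | hle
  · exact aux a b j j' ha hb hab hj hj' hle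
  · exact (aux b a j' j hb ha hab.symm hj' hj hle).symm

theorem leadDigit (x : Int) (hx : 1 ≤ x) : ∃ j : Nat, 1 ≤ x / 10^j ∧ x / 10^j ≤ 9 := by
  have aux : ∀ (N : Nat) (x : Int), 1 ≤ x → x ≤ (N : Int) →
      ∃ j : Nat, 1 ≤ x / 10^j ∧ x / 10^j ≤ 9 := by
    intro N
    induction N with
    | zero => intro x h1 h2; omega
    | succ N ih =>
      intro x h1 h2
      by_cases h9 : x ≤ 9
      · exact ⟨0, by simpa using h1, by simpa using h9⟩
      · have hq1 : 1 ≤ x / 10 := by omega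
        have hqN : x / 10 ≤ (N : Int) := by omega
        obtain ⟨j, hj1, hj2⟩ := ih (x / 10) hq1 hqN
        refine ⟨j + 1, ?_, ?_⟩
        · have heq : x / 10^(j+1) = x / 10 / 10^j := by
            have h1 := divdiv x 1 j
            rw [pow_one] at h1
            rw [show j + 1 = 1 + j by omega]
            exact h1.symm
          rw [heq]; exact hj1
        · have heq : x / 10^(j+1) = x / 10 / 10^j := by
            have h1 := divdiv x 1 j
            rw [pow_one] at h1
            rw [show j + 1 = 1 + j by omega]
            exact h1.symm
          rw [heq]; exact hj2
  exact aux x.toNat x hx (by omega)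

-- ---- membership and nodup of dfsL ----

theorem memLem (n : Int) (f : Nat) (c : Int) (hc : 1 ≤ c) (hf : (n + 1 - c).toNat ≤ f) (x : Int) :
    x ∈ dfsL n f c ↔ (c ≤ n ∧ x ≤ n ∧ ∃ j : Nat, x / 10^j = c) := by
  induction f generalizing c with
  | zero =>
    simp only [dfsL, List.not_mem_nil, false_iff]
    rintro ⟨h1, -, -⟩
    omega
  | succ f ih =>
    by_cases hgt : c > n
    · simp only [dfsL, hgt, if_true, List.not_mem_nil, false_iff]
      rintro ⟨h1, -, -⟩
      omega
    · have hcn : c ≤ n := by omega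
      simp only [dfsL, hgt, if_false, List.mem_cons]
      rw [mem_chainL]
      constructor
      · rintro (rfl | ⟨k, hk, hmem⟩)
        · exact ⟨hcn, hcn, 0, by simp⟩
        · have hkk : k < kN n c := hk
          have hk9 : (k : Int) ≤ 9 := by simp only [kN] at hkk; omega
          have hkkn : 10 * c + (k : Int) ≤ n := by simp only [kN] at hkk; omega
          rw [ih (10 * c + (k : Int)) (by omega) (by omega)] at hmem
          obtain ⟨-, hxn, j, hj⟩ := hmem
          refine ⟨hcn, hxn, j + 1, ?_⟩
          have h1 := divdiv x j 1
          rw [pow_one] at h1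
          rw [← h1, hj]
          omega
      · rintro ⟨-, hxn, j, hj⟩
        cases j with
        | zero =>
          left
          simp only [pow_zero, Int.ediv_one] at hj
          omega
        | succ j =>
          right
          have h1 := divdiv x j 1
          rw [pow_one] at h1
          have hpc : x / 10^j / 10 = c := by rw [h1]; exact hj
          have hcx : c ≤ x := descLB x c (j + 1) hj hc
          have hxpos : 0 ≤ x := by omega
          have hp0 : 0 ≤ x / 10^j := Int.ediv_nonneg hxpos (by positivity)
          have hpx : x / 10^j ≤ x := Int.ediv_le_self _ hxpos
          have hrange : 10 * c ≤ x / 10^j ∧ x / 10^j ≤ 10 * c + 9 := by omega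
          refine ⟨(x / 10^j - 10 * c).toNat, ?_, ?_⟩
          · simp only [kN]; omega
          · have he : 10 * c + ((x / 10^j - 10 * c).toNat : Int) = x / 10^j := by omega
            rw [he, ih (x / 10^j) (by omega) (by omega)]
            exact ⟨by omega, hxn, j, rfl⟩

theorem nodupLem (n : Int) (f : Nat) (c : Int) (hc : 1 ≤ c) (hf : (n + 1 - c).toNat ≤ f) :
    (dfsL n f c).Nodup := by
  induction f generalizing c with
  | zero => simp [dfsL]
  | succ f ih =>
    by_cases hgt : c > n
    · simp [dfsL, hgt]
    · simp only [dfsL, hgt, if_false]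
      rw [List.nodup_cons]
      constructor
      · intro hmem
        rw [mem_chainL] at hmem
        obtain ⟨k, hk, h⟩ := hmem
        have hk9 : (k : Int) ≤ 9 := by simp only [kN] at hk; omega
        rw [memLem n f (10 * c + (k : Int)) (by omega) (by omega)] at h
        obtain ⟨-, -, j, hj⟩ := h
        have := descLB c (10 * c + (k : Int)) j hj (by omega)
        omega
      · refine nodup_chainL _ _ _ (fun k hk => ?_) (fun k k' hkk hk' x hx hx' => ?_)
        · have hk9 : (k : Int) ≤ 9 := by simp only [kN] at hk; omega
          exact ih (10 * c + (k : Int)) (by omega) (by omega)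
        · have hk9 : (k' : Int) ≤ 9 := by simp only [kN] at hk'; omega
          have hkkn : k < kN n c := by omega
          rw [memLem n f (10 * c + (k : Int)) (by omega) (by omega)] at hx
          rw [memLem n f (10 * c + (k' : Int)) (by omega) (by omega)] at hx'
          obtain ⟨-, -, j, hj⟩ := hx
          obtain ⟨-, -, j', hj'⟩ := hx'
          have heq := descUnique x (10 * c + (k : Int)) (10 * c + (k' : Int)) j j'
            (by omega) (by omega) (by omega) hj hj'
          omega

theorem resAL_mem (n x : Int) : x ∈ resAL n ↔ 1 ≤ x ∧ x ≤ n := by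
  rw [resAL, mem_chainL]
  constructor
  · rintro ⟨k, hk, h⟩
    rw [memLem n (n.toNat + 1) (1 + (k : Int)) (by omega) (by omega)] at h
    obtain ⟨hrn, hxn, j, hj⟩ := h
    have := descLB x (1 + (k : Int)) j hj (by omega)
    exact ⟨by omega, hxn⟩
  · rintro ⟨hx1, hxn⟩
    obtain ⟨j, hd1, hd9⟩ := leadDigit x hx1
    have hdx : x / 10^j ≤ x := Int.ediv_le_self _ (by omega)
    refine ⟨(x / 10^j - 1).toNat, by omega, ?_⟩
    have he : 1 + ((x / 10^j - 1).toNat : Int) = x / 10^j := by omega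
    rw [he, memLem n (n.toNat + 1) (x / 10^j) (by omega) (by omega)]
    exact ⟨by omega, hxn, j, rfl⟩

theorem resAL_nodup (n : Int) : (resAL n).Nodup := by
  rw [resAL]
  refine nodup_chainL _ _ _ (fun k hk => ?_) (fun k k' hkk hk' x hx hx' => ?_)
  · exact nodupLem n (n.toNat + 1) (1 + (k : Int)) (by omega) (by omega)
  · rw [memLem n (n.toNat + 1) (1 + (k : Int)) (by omega) (by omega)] at hx
    rw [memLem n (n.toNat + 1) (1 + (k' : Int)) (by omega) (by omega)] at hx'
    obtain ⟨-, -, j, hj⟩ := hx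
    obtain ⟨-, -, j', hj'⟩ := hx'
    have hk9 : (k' : Int) ≤ 8 := by omega
    have heq := descUnique x (1 + (k : Int)) (1 + (k' : Int)) j j'
      (by omega) (by omega) (by omega) hj hj'
    omega

theorem resAL_length (n : Int) : (resAL n).length = n.toNat := by
  have hnd := resAL_nodup n
  have hfin : (resAL n).toFinset = Finset.Icc 1 n := by
    ext x
    simp [resAL_mem]
  calc (resAL n).length = (resAL n).toFinset.card := (List.toFinset_card_of_nodup hnd).symm
    _ = (Finset.Icc (1 : Int) n).card := by rw [hfin]
    _ = (n + 1 - 1).toNat := Int.card_Icc 1 n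
    _ = n.toNat := by congr 1; ring

-- ---- climb / successor ----

theorem climb_fuel (n : Int) (hn : 1 ≤ n) :
    ∀ (f : Nat) (c : Int) (f' : Nat), 0 ≤ c → c.toNat < f → c.toNat < f' →
      pvClimb n f c = pvClimb n f' c := by
  intro f
  induction f with
  | zero => intro c f' h0 h1 h2; omega
  | succ f ih =>
    intro c f' h0 h1 h2
    obtain ⟨f'', rfl⟩ : ∃ g, f' = g + 1 := ⟨f' - 1, by omega⟩
    simp only [pvClimb]
    by_cases hcond : PySem.Int.mod c 10 = 9 ∨ c + 1 > n
    · simp only [hcond, if_true]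
      have hm := PySem.Int.mod_eq_emod_of_pos (a := c) (b := 10) (by norm_num)
      have hc1 : 1 ≤ c := by
        rcases hcond with h | h
        · rw [hm] at h; omega
        · omega
      have hq : PySem.Int.floordiv c 10 = c / 10 := PySem.Int.floordiv_eq_ediv_of_pos (by norm_num)
      rw [hq]
      exact ih (c / 10) f'' (Int.ediv_nonneg (by omega) (by norm_num)) (by omega) (by omega)
    · rw [if_neg hcond, if_neg hcond]

theorem up_mid (n y : Int) (hy : 1 ≤ y) (hmod : y % 10 ≠ 9) (hn : y + 1 ≤ n) :
    upF n y = y + 1 := by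
  have hm := PySem.Int.mod_eq_emod_of_pos (a := y) (b := 10) (by norm_num)
  simp only [upF, pvClimb, hm]
  rw [if_neg (fun hor => by rcases hor with h | h; exact hmod h; omega)]

theorem up_last (n c : Int) (i : Int) (hc : 1 ≤ c) (hn : 1 ≤ n) (hi : 0 ≤ i) (hi9 : i ≤ 9)
    (hle : 10*c + i ≤ n) (hcond : i = 9 ∨ 10*c + i + 1 > n) :
    upF n (10*c + i) = upF n c := by
  have hm := PySem.Int.mod_eq_emod_of_pos (a := 10*c+i) (b := 10) (by norm_num)
  have hmod : PySem.Int.mod (10*c+i) 10 = i := by rw [hm]; omega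
  have hfd : PySem.Int.floordiv (10*c+i) 10 = c := by
    rw [PySem.Int.floordiv_eq_ediv_of_pos (by norm_num)]
    omega
  simp only [upF]
  congr 1
  have hstep : pvClimb n ((10*c+i).toNat + 1) (10*c+i) = pvClimb n ((10*c+i).toNat) c := by
    simp only [pvClimb, hmod, hfd]
    rw [if_pos (by omega)]
  rw [hstep]
  exact climb_fuel n hn ((10*c+i).toNat) c (c.toNat + 1) (by omega) (by omega) (by omega)

-- ---- the walk simulates the dfs ----

theorem chainWalk (n : Int) (g : Int → List Int) (t : Nat) (ht : t ≠ 0) :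
    ∀ (a : Int) (m : Nat),
      (∀ (y : Int) (m' : Nat), a ≤ y → y < a + t →
        pvWalk n y ((g y).length + m') = g y ++ pvWalk n (upF n y) m') →
      (∀ k : Nat, (k : Int) + 1 < t → upF n (a + k) = a + k + 1) →
      pvWalk n a ((chainL g a t).length + m) = chainL g a t ++ pvWalk n (upF n (a + t - 1)) m := by
  induction t with
  | zero => exact absurd rfl ht
  | succ t ih =>
    intro a m HW Hup
    cases t with
    | zero =>
      have h := HW a m (le_refl a) (by push_cast; omega)
      have he : a + ((1 : Nat) : Int) - 1 = a := by push_cast; ring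
      rw [he]
      simpa [chainL] using h
    | succ t =>
      rw [show chainL g a (t + 1 + 1) = g a ++ chainL g (a + 1) (t + 1) from rfl]
      have hup0 : upF n a = a + 1 := by simpa using Hup 0 (by push_cast; omega)
      have h1 := HW a ((chainL g (a + 1) (t + 1)).length + m) (le_refl a) (by push_cast; omega)
      rw [hup0] at h1
      have h2 := ih (by omega) (a + 1) m
        (fun y m' hy1 hy2 => HW y m' (by omega) (by push_cast at hy2 ⊢; omega))
        (fun k hk => by
          have h := Hup (k + 1) (by push_cast at hk ⊢; omega)
          have e : a + ((k + 1 : Nat) : Int) = a + 1 + (k : Int) := by push_cast; ring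
          rw [e] at h
          exact h)
      rw [List.length_append, Nat.add_assoc, h1, h2, List.append_assoc]
      have e2 : a + 1 + ((t + 1 : Nat) : Int) - 1 = a + ((t + 1 + 1 : Nat) : Int) - 1 := by
        push_cast; omega
      rw [e2]

theorem walkLem (n : Int) (f : Nat) :
    ∀ (c : Int) (m : Nat), 1 ≤ c → c ≤ n → (n + 1 - c).toNat ≤ f →
      pvWalk n c ((dfsL n f c).length + m) = dfsL n f c ++ pvWalk n (upF n c) m := by
  induction f with
  | zero =>
    intro c m hc hcn hf
    omega
  | succ f ih =>
    intro c m hc hcn hf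
    have hne : ¬ c > n := by omega
    rw [show dfsL n (f+1) c = c :: chainL (dfsL n f) (10*c) (kN n c) from by simp [dfsL, hne]]
    by_cases hkid : 10*c ≤ n
    · have hsucc : pvSucc n c = 10*c := by
        simp only [pvSucc]
        rw [if_pos (by omega)]
        ring
      have hkN1 : kN n c ≠ 0 := by simp only [kN]; omega
      have hcw := chainWalk n (dfsL n f) (kN n c) hkN1 (10*c) m
        (fun y m' hy1 hy2 => by
          have hyn : y ≤ n := by
            have : (kN n c : Int) ≤ n - 10*c + 1 := by simp only [kN]; omega
            omega
          exact ih y m' (by omega) hyn (by omega))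
        (fun k hk => by
          have hkb : (k : Int) + 1 < (kN n c : Int) := hk
          have hk8 : (k : Int) ≤ 8 := by simp only [kN] at hkb; omega
          have hkn : 10*c + (k : Int) + 1 ≤ n := by simp only [kN] at hkb; omega
          exact up_mid n (10*c + (k : Int)) (by omega) (by omega) hkn)
      have hterm : upF n (10*c + (kN n c : Int) - 1) = upF n c := by
        have hkb : 1 ≤ (kN n c : Int) ∧ (kN n c : Int) ≤ 10 ∧ (kN n c : Int) ≤ n - 10*c + 1 := by
          simp only [kN]; omega
        have h := up_last n c ((kN n c : Int) - 1) hc (by omega) (by omega) (by omega)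
          (by omega) (by simp only [kN]; omega)
        have e : 10*c + ((kN n c : Int) - 1) = 10*c + (kN n c : Int) - 1 := by ring
        rw [e] at h
        exact h
      rw [List.length_cons]
      rw [show (chainL (dfsL n f) (10*c) (kN n c)).length + 1 + m
          = ((chainL (dfsL n f) (10*c) (kN n c)).length + m) + 1 by omega]
      simp only [pvWalk]
      rw [hsucc, hcw, hterm]
      simp
    · have hkN0 : kN n c = 0 := by simp only [kN]; omega
      rw [hkN0]
      have hsucc : pvSucc n c = upF n c := by
        simp only [pvSucc, upF]
        rw [if_neg (by omega)]
      simp only [chainL, List.length_cons, List.length_nil]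
      rw [show 0 + 1 + m = m + 1 by omega]
      simp only [pvWalk]
      rw [hsucc]
      simp

theorem walk_eq_resAL (n : Int) (hn : 1 ≤ n) : pvWalk n 1 n.toNat = resAL n := by
  have hRne : min 9 n.toNat ≠ 0 := by omega
  have htr : resAL n = chainL (dfsL n (n.toNat + 1)) 1 (min 9 n.toNat) := by
    rw [resAL]
    refine chainL_truncate _ 1 9 (min 9 n.toNat) (by omega) (fun k hk hk9 => ?_)
    have hgt : (1 : Int) + (k : Int) > n := by omega
    simp [dfsL, hgt]
  have hcw := chainWalk n (dfsL n (n.toNat + 1)) (min 9 n.toNat) hRne 1 0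
    (fun y m' hy1 hy2 => by
      have hyn : y ≤ n := by push_cast at hy2; omega
      exact walkLem n (n.toNat + 1) y m' (by omega) hyn (by omega))
    (fun k hk => by
      have hkb : (k : Int) + 1 < ((min 9 n.toNat : Nat) : Int) := hk
      have hk8 : (k : Int) ≤ 7 := by push_cast at hkb; omega
      have hkn : 1 + (k : Int) + 1 ≤ n := by push_cast at hkb; omega
      exact up_mid n (1 + (k : Int)) (by omega) (by omega) hkn)
  rw [← htr] at hcw
  rw [resAL_length n] at hcw
  rw [show pvWalk n (upF n (1 + ((min 9 n.toNat : Nat) : Int) - 1)) 0 = [] from rfl] at hcw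
  rw [show n.toNat + 0 = n.toNat from rfl] at hcw
  rw [hcw]
  simp

-- ---- sums ----

theorem foldl_if_add (q : Int → Prop) [DecidablePred q] (L : List Int) (a : Int) :
    L.foldl (fun acc x => if q x then acc + x else acc) a
      = a + (L.map (fun x => if q x then x else 0)).sum := by
  induction L generalizing a with
  | nil => simp
  | cons x L ih =>
    by_cases hq : q x <;> simp [hq, ih, add_assoc]

-- ===== VERDICT (by name: the statement is the Claim_ definition above) =====
theorem lexicalOrder_spec : Claim_equal_lexicalOrder := by
  intro n _
  show lexicalOrder n = lexicalOrder_alt n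
  rw [lexicalOrder_eq]
  by_cases hn : 1 ≤ n
  · have hres := walk_eq_resAL n hn
    simp only [lexicalOrder_alt, if_pos hn, hres]
    rw [Prod.mk.injEq]
    refine ⟨rfl, ?_⟩
    rw [foldl_if_add, zero_add, wsum]
    congr 1
    apply List.map_congr_left
    intro x hx
    have hx1 : 1 ≤ x := ((resAL_mem n x).1 hx).1
    simp only [wA]
    refine if_congr ?_ rfl rfl
    constructor
    · rintro ⟨⟨h1, h2⟩, hL⟩
      exact ⟨by omega, hL⟩
    · rintro ⟨h, hL⟩
      exact ⟨⟨by omega, by omega⟩, hL⟩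
  · have hres : resAL n = [] := by
      rw [resAL]
      rw [chainL_truncate (dfsL n (n.toNat + 1)) 1 9 0 (by omega)
        (fun k hk hk9 => by
          have hgt : (1 : Int) + (k : Int) > n := by omega
          simp [dfsL, hgt])]
      rfl
    simp [lexicalOrder_alt, hn, hres, wsum]
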